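-- pv_equiv track=rewrite | github.com/Gatesby2026/zhongkao-agent | scripts/pdf-to-questionbank.py | fix_latex_backslashes
-- ===== SOURCE A (Python) =====
-- def fix_latex_backslashes(text: str) -> str:
--     """
--     Qwen 输出的 YAML 双引号字符串中，LaTeX 反斜杠（\dfrac \sqrt 等）会被
--     YAML 解析器当作转义序列报错。遍历字符，将双引号字符串内的 \ 全部加倍。
--     """
--     result = []
--     in_dq = False
--     for c in text:
--         if not in_dq:
--             if c == '"':
--                 in_dq = True
--             result.append(c)
--         else:
--             if c == '\\':
--                 result.append('\\\\')   # 加倍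
--             elif c == '"':
--                 in_dq = False
--                 result.append(c)
--             else:
--                 result.append(c)
--     return ''.join(result)
-- ===== SOURCE B (Python) =====
-- def fix_latex_backslashes(text: str) -> str:
--     parts = text.split('"')
--     for i in range(1, len(parts), 2):
--         parts[i] = parts[i].replace('\\', '\\\\')
--     return '"'.join(parts)
-- ===== Notes on version B (the rewrite author's own statement) =====
-- stated objective: simpler
-- what changed: Replaced the per-character in_dq state machine with a token-level split on the double-quote character, doubling backslashes only in the odd (inside-quotes) segments via str.replace, then rejoining the segments.
import Mathlib
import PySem

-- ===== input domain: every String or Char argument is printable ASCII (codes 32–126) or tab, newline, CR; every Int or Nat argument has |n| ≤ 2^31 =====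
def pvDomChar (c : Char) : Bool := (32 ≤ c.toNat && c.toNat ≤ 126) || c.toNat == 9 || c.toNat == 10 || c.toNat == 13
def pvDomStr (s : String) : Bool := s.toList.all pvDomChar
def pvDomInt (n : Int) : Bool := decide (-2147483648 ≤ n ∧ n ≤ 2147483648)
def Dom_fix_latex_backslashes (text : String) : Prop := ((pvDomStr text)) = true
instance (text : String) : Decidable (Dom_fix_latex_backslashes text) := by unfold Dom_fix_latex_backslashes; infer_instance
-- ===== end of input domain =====

-- B replaces A's per-character in_dq state machine by split-on-'"' / double backslashes
-- in odd segments / rejoin (objective: simpler).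

-- ===== PORT A =====
-- the loop body of A: state = (result pieces, in_dq)
def pvStepA (st : List (List Char) × Bool) (c : Char) : List (List Char) × Bool :=
  if !st.2 then
    if c == '"' then (st.1 ++ [[c]], true)
    else (st.1 ++ [[c]], st.2)
  else
    if c == '\\' then (st.1 ++ [['\\', '\\']], st.2)
    else if c == '"' then (st.1 ++ [[c]], false)
    else (st.1 ++ [[c]], st.2)

def fix_latex_backslashes (text : String) : String :=
  let fin := text.toList.foldl pvStepA ([], false)
  String.ofList (PySem.Chars.join [] fin.1)      -- ''.join(result)

-- ===== PORT B =====
-- p.replace('\\', '\\\\') for the single-char pattern: each '\' becomes two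
def pvDouble (p : List Char) : List Char :=
  p.flatMap (fun c => if c == '\\' then ['\\', '\\'] else [c])

def fix_latex_backslashes_alt (text : String) : String :=
  let parts := text.toList.splitOn '"'
  let fixed := (PySem.List.enumerate parts).map
    (fun ip => if ip.1 % 2 == 1 then pvDouble ip.2 else ip.2)
  String.ofList (List.intercalate ['"'] fixed)   -- '"'.join(parts)

-- ===== PRECONDITION & SPEC =====
def Spec_fix_latex_backslashes (text : String) (out : String) : Prop := out = fix_latex_backslashes_alt text
instance (text : String) (out : String) : Decidable (Spec_fix_latex_backslashes text out) := by unfold Spec_fix_latex_backslashes; infer_instance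

-- ===== CLAIM (what is proved, stated in full; the proofs are below) =====
def Claim_equal_fix_latex_backslashes : Prop := ∀ (text : String), Dom_fix_latex_backslashes text → Spec_fix_latex_backslashes text (fix_latex_backslashes text)

-- ===== LEMMAS AND PROOFS =====

-- common normal form: the doubled text, as a function of the in-quotes state
def pvFix : Bool → List Char → List Char
  | _, [] => []
  | b, c :: cs => (if b && c == '\\' then ['\\', '\\'] else [c]) ++ pvFix (xor b (c == '"')) cs

theorem pvFoldA (cs : List Char) : ∀ (acc : List (List Char)) (b : Bool),
    ((cs.foldl pvStepA (acc, b)).1).flatten = acc.flatten ++ pvFix b cs := by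
  induction cs with
  | nil => intro acc b; simp [pvFix]
  | cons c cs ih =>
    intro acc b
    cases b with
    | false =>
      by_cases h : c = '"'
      · have hc : (c == '"') = true := by simp [h]
        simp [pvStepA, pvFix, hc, ih, List.append_assoc]
      · have hc : (c == '"') = false := by simp [h]
        simp [pvStepA, pvFix, hc, ih, List.append_assoc]
    | true =>
      by_cases h1 : c = '\\'
      · have hb : (c == '\\') = true := by simp [h1]
        have hc : (c == '"') = false := by simp [h1]
        simp [pvStepA, pvFix, hb, hc, ih, List.append_assoc]
      · have hb : (c == '\\') = false := by simp [h1]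
        by_cases h2 : c = '"'
        · have hc : (c == '"') = true := by simp [h2]
          simp [pvStepA, pvFix, hb, hc, ih, List.append_assoc]
        · have hc : (c == '"') = false := by simp [h2]
          simp [pvStepA, pvFix, hb, hc, ih, List.append_assoc]

theorem pvIntercalate_cons {α : Type} (sep y : List α) (l : List (List α)) :
    List.intercalate sep (y :: l) = y ++ l.flatMap (fun z => sep ++ z) := by
  induction l generalizing y with
  | nil => simp [List.intercalate]
  | cons z l ih =>
    simp only [List.intercalate, List.intersperse_cons₂, List.flatten_cons] at *
    simp [ih, List.append_assoc]

theorem pvIntercalate_nil_sep (parts : List (List Char)) :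
    List.intercalate ([] : List Char) parts = parts.flatten := by
  cases parts with
  | nil => simp [List.intercalate]
  | cons y l => simp [pvIntercalate_cons, List.flatMap_id']

theorem pvIntercalate_head {α : Type} (sep h x : List α) (l : List (List α)) :
    List.intercalate sep ((h ++ x) :: l) = h ++ List.intercalate sep (x :: l) := by
  simp [pvIntercalate_cons, List.append_assoc]

theorem pvSplitB (cs : List Char) : ∀ (s : Int) (b : Bool), decide (s % 2 = 1) = b →
    List.intercalate ['"'] ((PySem.List.enumerate (cs.splitOn '"') s).map
      (fun ip => if ip.1 % 2 == 1 then pvDouble ip.2 else ip.2)) = pvFix b cs := by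
  induction cs with
  | nil =>
    intro s b _
    simp [List.splitOn, PySem.List.enumerate_cons, PySem.List.enumerate_nil,
      pvDouble, pvFix, List.intercalate]
  | cons c cs ih =>
    intro s b hb
    obtain ⟨p, ps, hsp⟩ : ∃ p ps, cs.splitOn '"' = p :: ps := by
      cases hsp : cs.splitOn '"' with
      | nil => exact absurd hsp (List.splitOnP_ne_nil _ cs)
      | cons p ps => exact ⟨p, ps, rfl⟩
    by_cases h : c = '"'
    · -- a quote closes/opens a segment: index parity flips
      have hc : (c == '"') = true := by simp [h]
      have hih := ih (s + 1) (!b)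
        (by subst hb; rcases Int.emod_two_eq_zero_or_one s with h2 | h2 <;> simp [h2] <;> omega)
      rw [hsp, PySem.List.enumerate_cons, List.map_cons] at hih
      simp only [List.splitOn, List.splitOnP_cons, hc, if_true] at hsp ⊢
      rw [hsp, PySem.List.enumerate_cons, List.map_cons, PySem.List.enumerate_cons, List.map_cons]
      have hz : (if (s % 2 == 1) = true then pvDouble [] else ([] : List Char)) = [] := by
        split <;> simp [pvDouble]
      rw [hz, pvIntercalate_cons, List.flatMap_cons]
      rw [pvIntercalate_cons] at hih
      simp only [List.nil_append, List.singleton_append] at hih ⊢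
      rw [List.cons_append, hih]
      subst h
      cases b <;> simp [pvFix]
    · -- an ordinary char extends the current segment, same parity
      have hc : (c == '"') = false := by simp [h]
      have hih := ih s b hb
      rw [hsp, PySem.List.enumerate_cons, List.map_cons] at hih
      simp only [List.splitOn, List.splitOnP_cons, hc, if_false, Bool.false_eq_true] at hsp ⊢
      rw [hsp]
      simp only [List.modifyHead, PySem.List.enumerate_cons, List.map_cons]
      have hsplit : (if (s % 2 == 1) = true then pvDouble (c :: p) else c :: p) =
          (if b && (c == '\\') then ['\\', '\\'] else [c]) ++
            (if (s % 2 == 1) = true then pvDouble p else p) := by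
        subst hb
        by_cases hb2 : s % 2 = 1 <;> by_cases hcc : c = '\\' <;>
          simp [hb2, hcc, pvDouble]
      rw [hsplit, pvIntercalate_head, hih]
      simp [pvFix, hc]

-- ===== VERDICT (by name: the statement is the Claim_ definition above) =====
theorem fix_latex_backslashes_spec : Claim_equal_fix_latex_backslashes := by
  intro text _
  unfold Spec_fix_latex_backslashes fix_latex_backslashes fix_latex_backslashes_alt
  simp only [PySem.Chars.join, pvIntercalate_nil_sep]
  rw [pvFoldA text.toList [] false, pvSplitB text.toList 0 false (by decide)]
  simp
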